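-- pv_equiv track=rewrite | github.com/JK0201/LeetCode | 2610-convert-an-array-into-a-2d-array-with-conditions/2610-convert-an-array-into-a-2d-array-with-conditions.py | findMatrix
-- ===== SOURCE A (Python) =====
-- from typing import List
--
-- def findMatrix(nums: List[int]) -> List[List[int]]:
--     dict = {}
--
--     for n in nums:
--         if n not in dict:
--             dict[n] = 1
--
--         else:
--             dict[n] += 1
--
--     res = []
--     grp = []
--     while True:
--         for k in dict:
--             if dict[k] != 0:
--                 dict[k] -= 1
--                 grp.append(k)
--
--         if not grp:
--             break
--
--         res.append(grp)
--         grp = []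
--
--     return res
-- ===== SOURCE B (Python) =====
-- def findMatrix(nums):
--     cnt = {}
--     for n in nums:
--         cnt[n] = cnt.get(n, 0) + 1
--     rows = []
--     for k, c in cnt.items():
--         for i in range(c):
--             if i == len(rows):
--                 rows.append([])
--             rows[i].append(k)
--     return rows
-- ===== Notes on version B (the rewrite author's own statement) =====
-- stated objective: alternative
-- what changed: Instead of A's repeated sweeps over the whole count dict (one sweep per output row, decrementing counts until a sweep comes up empty), B counts once and fills column-wise: each distinct key is appended to rows 0..count-1 in a single pass over the keys, never rescanning keys whose occurrences are exhausted.
import Mathlib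
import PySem

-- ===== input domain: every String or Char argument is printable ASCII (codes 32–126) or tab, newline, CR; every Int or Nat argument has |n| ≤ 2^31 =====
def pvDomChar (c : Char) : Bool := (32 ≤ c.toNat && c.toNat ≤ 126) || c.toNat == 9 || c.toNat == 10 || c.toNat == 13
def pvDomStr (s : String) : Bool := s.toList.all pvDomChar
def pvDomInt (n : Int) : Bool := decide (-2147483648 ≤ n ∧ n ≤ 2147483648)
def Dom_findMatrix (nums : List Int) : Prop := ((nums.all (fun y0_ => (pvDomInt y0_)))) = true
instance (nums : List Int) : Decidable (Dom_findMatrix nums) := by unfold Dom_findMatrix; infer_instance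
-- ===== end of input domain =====

-- B replaces A's repeated whole-dict sweeps (one sweep per output row, decrementing counts)
-- by counting once and filling column-wise: each key is appended to rows 0..count-1 in one
-- pass over the distinct keys (objective: alternative algorithm, same observable result).

-- ===== PORT A =====
-- the 'for k in dict:' body: walks the keys, decrementing each nonzero count and appending its key to grp
def pvSweep (ks : List Int) (d : PySem.Dict Int Int) (grp : List Int) :
    PySem.Dict Int Int × List Int :=
  match ks with
  | [] => (d, grp)
  | k :: ks =>
      if d.getD k 0 ≠ 0 then
        pvSweep ks (d.insert k (d.getD k 0 - 1)) (grp ++ [k])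
      else
        pvSweep ks d grp

-- the 'while True:' loop; fuel = total remaining count + 1 at the call site, which the loop never exhausts
def pvLoopA (fuel : Nat) (d : PySem.Dict Int Int) (res : List (List Int)) : List (List Int) :=
  match fuel with
  | 0 => res
  | fuel + 1 =>
      let s := pvSweep d.keys d []
      if s.2 = [] then res
      else pvLoopA fuel s.1 (res ++ [s.2])

def findMatrix (nums : List Int) : List (List Int) :=
  let d := nums.foldl
    (fun d n => if ¬ d.contains n then d.insert n 1 else d.insert n (d.getD n 0 + 1))
    PySem.Dict.empty
  pvLoopA ((d.values.map Int.toNat).sum + 1) d []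

-- ===== PORT B =====
-- body of 'for i in range(c):' — i is always 0 ≤ i ≤ len(rows), so i.toNat indexing is exact
def pvFillStep (k : Int) (rows : List (List Int)) (i : Int) : List (List Int) :=
  let rows' := if i = (rows.length : Int) then rows ++ [[]] else rows
  rows'.modify i.toNat (fun r => r ++ [k])   -- rows[i].append(k)

def findMatrix_alt (nums : List Int) : List (List Int) :=
  let cnt := nums.foldl (fun d n => d.insert n (d.getD n 0 + 1)) PySem.Dict.empty
  cnt.items.foldl (fun rows kc => (PySem.List.pyRange 0 kc.2 1).foldl (pvFillStep kc.1) rows) []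

-- ===== PRECONDITION & SPEC =====
def Spec_findMatrix (nums : List Int) (out : List (List Int)) : Prop := out = findMatrix_alt nums
instance (nums : List Int) (out : List (List Int)) : Decidable (Spec_findMatrix nums out) := by unfold Spec_findMatrix; infer_instance

-- ===== CLAIM (what is proved, stated in full; the proofs are below) =====
def Claim_equal_findMatrix : Prop := ∀ (nums : List Int), Dom_findMatrix nums → Spec_findMatrix nums (findMatrix nums)

-- ===== LEMMAS AND PROOFS =====

-- common normal form: row j = keys with count > j, for j up to the maximum count
def pvDec (v : Int) : Int := if v ≠ 0 then v - 1 else v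

def pvMaxd (d : PySem.Dict Int Int) : Int := (PySem.List.max? d.values (fun v => v)).getD 0

def pvRows (d : PySem.Dict Int Int) : List (List Int) :=
  (List.range (pvMaxd d).toNat).map
    (fun (j : Nat) => d.keys.filter (fun k => decide ((j : Int) < d.getD k 0)))

-- ---- A-side: the sweep loop computes pvRows ----

lemma pvSweep_spec (ks : List Int) (d : PySem.Dict Int Int) (grp : List Int)
    (hnd : ks.Nodup) (hsub : ∀ k ∈ ks, d.contains k = true) :
    (pvSweep ks d grp).2 = grp ++ ks.filter (fun k => decide (d.getD k 0 ≠ 0)) ∧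
    (pvSweep ks d grp).1.keys = d.keys ∧
    ∀ j, (pvSweep ks d grp).1.getD j 0 = if j ∈ ks then pvDec (d.getD j 0) else d.getD j 0 := by
  induction ks generalizing d grp with
  | nil => simp [pvSweep]
  | cons k ks ih =>
    have hk := hsub k List.mem_cons_self
    have hknotin : k ∉ ks := (List.nodup_cons.mp hnd).1
    have hnd' := (List.nodup_cons.mp hnd).2
    by_cases h : d.getD k 0 ≠ 0
    · have hstep : pvSweep (k :: ks) d grp
          = pvSweep ks (d.insert k (d.getD k 0 - 1)) (grp ++ [k]) := by
        simp [pvSweep, h]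
      set d1 := d.insert k (d.getD k 0 - 1) with hd1
      have hsub1 : ∀ k' ∈ ks, d1.contains k' = true := by
        intro k' hk'
        rw [hd1, PySem.Dict.contains_insert]
        simp [hsub k' (List.mem_cons_of_mem _ hk')]
      obtain ⟨hA, hB, hC⟩ := ih d1 (grp ++ [k]) hnd' hsub1
      have hged : ∀ k' ∈ ks, d1.getD k' 0 = d.getD k' 0 := by
        intro k' hk'
        rw [hd1, PySem.Dict.getD_insert]
        have : k' ≠ k := fun e => hknotin (e ▸ hk')
        simp [this]
      refine ⟨?_, ?_, ?_⟩
      · rw [hstep, hA]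
        have : ks.filter (fun k' => decide (d1.getD k' 0 ≠ 0))
            = ks.filter (fun k' => decide (d.getD k' 0 ≠ 0)) := by
          apply List.filter_congr
          intro k' hk'; rw [hged k' hk']
        rw [this]
        simp [h]
      · rw [hstep, hB, hd1, PySem.Dict.keys_insert_of_contains _ _ hk]
      · intro j
        rw [hstep, hC j]
        by_cases hj : j ∈ ks
        · have : j ≠ k := fun e => hknotin (e ▸ hj)
          simp [hj, List.mem_cons, this, hged j hj]
        · rw [hd1, PySem.Dict.getD_insert]
          by_cases hjk : j = k
          · subst hjk
            simp [hj, pvDec, h]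
          · simp [hj, hjk, List.mem_cons]
    · have hstep : pvSweep (k :: ks) d grp = pvSweep ks d grp := by
        simp [pvSweep, h]
      obtain ⟨hA, hB, hC⟩ := ih d grp hnd' (fun k' hk' => hsub k' (List.mem_cons_of_mem _ hk'))
      refine ⟨?_, hstep ▸ hB, ?_⟩
      · rw [hstep, hA, List.filter_cons]
        simp [h]
      · intro j
        rw [hstep, hC j]
        by_cases hj : j ∈ ks
        · simp [hj, List.mem_cons]
        · by_cases hjk : j = k
          · subst hjk
            push Not at h
            simp [hj, pvDec, h, List.mem_cons]
          · simp [hj, hjk, List.mem_cons]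

lemma pvMaxd_eq (d : PySem.Dict Int Int) (x : Int) (hmem : x ∈ d.values)
    (hub : ∀ y ∈ d.values, y ≤ x) : pvMaxd d = x := by
  unfold pvMaxd
  cases hm : PySem.List.max? d.values (fun v => v) with
  | none => exact absurd ((PySem.List.max?_eq_none_iff _ _).mp hm ▸ hmem) (List.not_mem_nil)
  | some m =>
    have h1 := PySem.List.max?_mem hm
    have h2 := PySem.List.max?_isMax hm x hmem
    exact le_antisymm (hub m h1) h2

lemma pvSum_lt_sum (l : List Int) (f g : Int → ℕ) (hle : ∀ x ∈ l, f x ≤ g x)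
    (hex : ∃ x ∈ l, f x < g x) : (l.map f).sum < (l.map g).sum := by
  induction l with
  | nil => obtain ⟨x, hx, _⟩ := hex; exact absurd hx List.not_mem_nil
  | cons a l ih =>
    simp only [List.map_cons, List.sum_cons]
    obtain ⟨x, hx, hlt⟩ := hex
    rcases List.mem_cons.mp hx with rfl | hx
    · have : (l.map f).sum ≤ (l.map g).sum :=
        List.sum_le_sum (fun y hy => hle y (List.mem_cons_of_mem _ hy))
      omega
    · have := ih (fun y hy => hle y (List.mem_cons_of_mem _ hy)) ⟨x, hx, hlt⟩
      have ha := hle a (List.mem_cons_self)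
      omega

lemma pvLoop_eq (fuel : Nat) (d : PySem.Dict Int Int) (res : List (List Int))
    (hnd : d.keys.Nodup) (hpos : ∀ k, 0 ≤ d.getD k 0)
    (hfuel : (d.keys.map (fun k => (d.getD k 0).toNat)).sum < fuel) :
    pvLoopA fuel d res = res ++ pvRows d := by
  induction fuel generalizing d res with
  | zero => omega
  | succ fuel ih =>
    have hsub : ∀ k ∈ d.keys, d.contains k = true := by
      intro k hk; exact (PySem.Dict.contains_iff_mem_keys d k).mpr hk
    obtain ⟨hA, hB, hC⟩ := pvSweep_spec d.keys d [] hnd hsub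
    set s := pvSweep d.keys d [] with hs
    rw [List.nil_append] at hA
    have hC' : ∀ j, s.1.getD j 0 = pvDec (d.getD j 0) := by
      intro j
      rw [hC j]
      by_cases hj : j ∈ d.keys
      · simp [hj]
      · have hnc : d.contains j = false := by
          rcases h : d.contains j with _ | _
          · rfl
          · exact absurd ((PySem.Dict.contains_iff_mem_keys d j).mp h) hj
        rw [PySem.Dict.getD_of_not_contains d 0 hnc]
        simp [hj, pvDec]
    have hvals := PySem.Dict.values_eq_map_keys d hnd 0
    by_cases hg : s.2 = []
    · have hall : ∀ k ∈ d.keys, d.getD k 0 = 0 := by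
        intro k hk
        have := List.filter_eq_nil_iff.mp (hA ▸ hg) k hk
        simpa using this
      have hmax : pvMaxd d = 0 := by
        cases hks : d.keys with
        | nil =>
          unfold pvMaxd
          rw [(PySem.List.max?_eq_none_iff d.values (fun v => v)).mpr (by rw [hvals, hks]; rfl)]
          rfl
        | cons k ks =>
          apply pvMaxd_eq
          · rw [hvals, hks]
            exact List.mem_map.mpr ⟨k, List.mem_cons_self, (hall k (hks ▸ List.mem_cons_self))⟩
          · intro y hy
            rw [hvals] at hy
            obtain ⟨k', hk', rfl⟩ := List.mem_map.mp hy
            rw [hall k' hk']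
      have : pvRows d = [] := by unfold pvRows; rw [hmax]; rfl
      rw [this, List.append_nil]
      have h0 : pvLoopA (fuel + 1) d res
          = if (pvSweep d.keys d []).2 = [] then res
            else pvLoopA fuel (pvSweep d.keys d []).1 (res ++ [(pvSweep d.keys d []).2]) := rfl
      rw [h0, ← hs, if_pos hg]
    · have hstep : pvLoopA (fuel + 1) d res = pvLoopA fuel s.1 (res ++ [s.2]) := by
        have h0 : pvLoopA (fuel + 1) d res
            = if (pvSweep d.keys d []).2 = [] then res
              else pvLoopA fuel (pvSweep d.keys d []).1 (res ++ [(pvSweep d.keys d []).2]) := rfl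
        rw [h0, ← hs, if_neg hg]
      obtain ⟨k0, hk0mem, hk0⟩ : ∃ k ∈ d.keys, d.getD k 0 ≠ 0 := by
        rcases hl : d.keys.filter (fun k => decide (d.getD k 0 ≠ 0)) with _ | ⟨k, t⟩
        · exact absurd (hA.trans hl) hg
        · have : k ∈ d.keys.filter (fun k => decide (d.getD k 0 ≠ 0)) := by
            rw [hl]; exact List.mem_cons_self
          have := List.mem_filter.mp this
          exact ⟨k, this.1, by simpa using this.2⟩
      have hk0pos : 1 ≤ d.getD k0 0 := by have := hpos k0; omega
      have hvne : d.values ≠ [] := by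
        rw [hvals]
        intro h
        exact absurd (List.map_eq_nil_iff.mp h ▸ hk0mem) List.not_mem_nil
      obtain ⟨m, hm⟩ : ∃ m, PySem.List.max? d.values (fun v => v) = some m := by
        rcases h : PySem.List.max? d.values (fun v => v) with _ | m
        · exact absurd ((PySem.List.max?_eq_none_iff _ _).mp h) hvne
        · exact ⟨m, rfl⟩
      have hMdef : pvMaxd d = m := by unfold pvMaxd; rw [hm]; rfl
      have hub : ∀ y ∈ d.values, y ≤ m := PySem.List.max?_isMax hm
      have hM1 : 1 ≤ m := le_trans hk0pos
        (hub _ (hvals ▸ List.mem_map.mpr ⟨k0, hk0mem, rfl⟩))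
      have hnd1 : s.1.keys.Nodup := hB ▸ hnd
      have hvals1 := PySem.Dict.values_eq_map_keys s.1 hnd1 0
      rw [hB] at hvals1
      have hpos1 : ∀ k, 0 ≤ s.1.getD k 0 := by
        intro k; rw [hC' k]; unfold pvDec; have := hpos k; split <;> omega
      obtain ⟨kM, hkMmem, hkM⟩ : ∃ k ∈ d.keys, d.getD k 0 = m := by
        have : m ∈ d.values := PySem.List.max?_mem hm
        rw [hvals] at this
        obtain ⟨k, hk, hke⟩ := List.mem_map.mp this
        exact ⟨k, hk, hke⟩
      have hmax1 : pvMaxd s.1 = m - 1 := by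
        apply pvMaxd_eq
        · rw [hvals1]
          refine List.mem_map.mpr ⟨kM, hkMmem, ?_⟩
          rw [hC' kM, hkM]
          unfold pvDec
          simp [show m ≠ 0 by omega]
        · intro y hy
          rw [hvals1] at hy
          obtain ⟨k, hk, rfl⟩ := List.mem_map.mp hy
          rw [hC' k]
          have h1 : d.getD k 0 ≤ m := hub _ (hvals ▸ List.mem_map.mpr ⟨k, hk, rfl⟩)
          unfold pvDec; split <;> omega
      have hfuel1 : (s.1.keys.map (fun k => (s.1.getD k 0).toNat)).sum < fuel := by
        have hlt : (d.keys.map (fun k => (s.1.getD k 0).toNat)).sum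
            < (d.keys.map (fun k => (d.getD k 0).toNat)).sum := by
          apply pvSum_lt_sum
          · intro k _
            rw [hC' k]; unfold pvDec; have := hpos k; split <;> omega
          · refine ⟨k0, hk0mem, ?_⟩
            rw [hC' k0]; unfold pvDec; split <;> omega
        rw [hB]
        omega
      rw [hstep, ih s.1 (res ++ [s.2]) hnd1 hpos1 hfuel1, List.append_assoc]
      congr 1
      have htn : (pvMaxd d).toNat = (pvMaxd s.1).toNat + 1 := by
        rw [hMdef, hmax1]; omega
      show [s.2] ++ pvRows s.1 = pvRows d
      unfold pvRows
      rw [htn, List.range_succ_eq_map, List.map_cons, List.map_map, List.singleton_append]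
      congr 1
      · rw [hA]
        apply List.filter_congr
        intro k _
        rw [decide_eq_decide]
        have := hpos k
        simp only [Nat.cast_zero]
        constructor <;> intro h <;> omega
      · apply List.map_congr_left
        intro j _
        rw [hB]
        apply List.filter_congr
        intro k _
        rw [hC' k, decide_eq_decide]
        unfold pvDec
        have := hpos k
        push_cast [Function.comp, Nat.succ_eq_add_one]
        split <;> omega

lemma pvCounter_eq (nums : List Int) :
    nums.foldl
      (fun d n => if ¬ d.contains n then d.insert n 1 else d.insert n (d.getD n 0 + 1))
      PySem.Dict.empty = PySem.Dict.counter nums := by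
  have hstep : (fun (d : PySem.Dict Int Int) (n : Int) =>
      if ¬ d.contains n then d.insert n 1 else d.insert n (d.getD n 0 + 1))
      = (fun d n => d.insert n (d.getD n 0 + 1)) := by
    funext d n
    by_cases h : d.contains n = true
    · simp [h]
    · have h' : d.contains n = false := by
        rcases hh : d.contains n
        · rfl
        · exact absurd hh h
      rw [PySem.Dict.getD_of_not_contains d 0 h']
      simp [h']
  rw [hstep, PySem.Dict.foldl_insert_getD_add_one_eq_counter]

-- ---- B-side: the column-wise fill computes pvRows ----

-- the inner 'for i in range(c)' loop, re-indexed over Nat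
def pvFillN (k : Int) (rows : List (List Int)) (c : Nat) : List (List Int) :=
  (List.range c).foldl (fun rows (i : Nat) => pvFillStep k rows ((i : Nat) : Int)) rows

lemma pvFillN_spec (k : Int) (rows : List (List Int)) (c : Nat) :
    (pvFillN k rows c).length = max rows.length c ∧
    ∀ j, (pvFillN k rows c).getD j [] = rows.getD j [] ++ (if j < c then [k] else []) := by
  induction c with
  | zero => simp [pvFillN]
  | succ c ih =>
    obtain ⟨hlen, hget⟩ := ih
    have hstep : pvFillN k rows (c + 1) = pvFillStep k (pvFillN k rows c) (c : Int) := by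
      unfold pvFillN
      rw [List.range_succ, List.foldl_append, List.foldl_cons, List.foldl_nil]
    set R := pvFillN k rows c with hR
    have hrlen : rows.length ≤ R.length := by rw [hlen]; omega
    have hclen : c ≤ R.length := by rw [hlen]; omega
    by_cases hc : c = R.length
    · -- i == len(rows): a fresh empty row is appended, then k goes into it
      have hcond : (c : Int) = (R.length : Int) := by exact_mod_cast hc
      have hstep' : pvFillN k rows (c + 1) = (R ++ [[]]).modify c (fun r => r ++ [k]) := by
        rw [hstep]; unfold pvFillStep
        simp only [if_pos hcond, Int.toNat_natCast]
      refine ⟨?_, ?_⟩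
      · rw [hstep', List.length_modify, List.length_append, hlen]
        simp; omega
      · intro j
        rw [hstep', List.getD_eq_getElem?_getD, List.getElem?_modify]
        rcases Nat.lt_trichotomy j c with hj | hj | hj
        · have hjR : j < R.length := by omega
          rw [List.getElem?_append_left hjR, List.getElem?_eq_getElem hjR]
          have hne : ¬ (c = j) := by omega
          simp only [if_neg hne]
          have hgj := hget j
          rw [List.getD_eq_getElem?_getD, List.getElem?_eq_getElem hjR, Option.getD_some] at hgj
          rw [hgj, if_pos hj, if_pos (by omega : j < c + 1)]
          simp
        · subst hj
          have hsome : (R ++ [[]])[j]? = some [] := by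
            rw [List.getElem?_append_right (by omega), hc]
            simp
          rw [hsome]
          simp only []
          have hrow : rows.getD j [] = [] := by
            rw [List.getD_eq_getElem?_getD, List.getElem?_eq_none (by omega)]
            rfl
          rw [hrow, if_pos (by omega : j < j + 1), List.nil_append]
          simp
        · have hnone : (R ++ [[]])[j]? = none := by
            rw [List.getElem?_eq_none]
            simp; omega
          rw [hnone]
          have hrow : rows.getD j [] = [] := by
            rw [List.getD_eq_getElem?_getD, List.getElem?_eq_none (by omega)]
            rfl
          rw [hrow, if_neg (by omega : ¬ j < c + 1)]
          rfl
    · -- i < len(rows): k is appended to the existing row i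
      have hcond : ¬ ((c : Int) = (R.length : Int)) := by
        intro h; exact hc (by exact_mod_cast h)
      have hclt : c < R.length := by omega
      have hstep' : pvFillN k rows (c + 1) = R.modify c (fun r => r ++ [k]) := by
        rw [hstep]; unfold pvFillStep
        simp only [if_neg hcond, Int.toNat_natCast]
      refine ⟨?_, ?_⟩
      · rw [hstep', List.length_modify, hlen]; omega
      · intro j
        rw [hstep', List.getD_eq_getElem?_getD, List.getElem?_modify]
        by_cases hj : j = c
        · subst hj
          rw [List.getElem?_eq_getElem hclt]
          simp only []
          have hgj := hget j
          rw [List.getD_eq_getElem?_getD, List.getElem?_eq_getElem hclt, Option.getD_some] at hgj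
          rw [hgj, if_neg (lt_irrefl j), if_pos (by omega : j < j + 1), List.append_nil]
          simp
        · have hne : ¬ (c = j) := fun h => hj h.symm
          have hid : ((fun a => if c = j then a ++ [k] else a) <$> R[j]?) = R[j]? := by
            cases R[j]? <;> simp [hne]
          rw [hid, ← List.getD_eq_getElem?_getD, hget j]
          by_cases hjc : j < c
          · rw [if_pos hjc, if_pos (by omega : j < c + 1)]
          · rw [if_neg hjc, if_neg (by omega : ¬ j < c + 1)]

-- maximum count among the items, as a Nat
def pvMaxc (items : List (Int × Int)) : Nat :=
  (items.map (fun kc => kc.2.toNat)).foldr max 0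

lemma pvFoldItems_spec (items : List (Int × Int)) (rows : List (List Int)) :
    (items.foldl (fun r kc => pvFillN kc.1 r kc.2.toNat) rows).length
        = max rows.length (pvMaxc items) ∧
    ∀ j, (items.foldl (fun r kc => pvFillN kc.1 r kc.2.toNat) rows).getD j []
        = rows.getD j [] ++ (items.filter (fun kc => decide (j < kc.2.toNat))).map Prod.fst := by
  induction items generalizing rows with
  | nil => simp [pvMaxc]
  | cons kc rest ih =>
    obtain ⟨hflen, hfget⟩ := pvFillN_spec kc.1 rows kc.2.toNat
    obtain ⟨hlen, hget⟩ := ih (pvFillN kc.1 rows kc.2.toNat)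
    refine ⟨?_, ?_⟩
    · rw [List.foldl_cons, hlen, hflen]
      unfold pvMaxc
      rw [List.map_cons, List.foldr_cons]
      omega
    · intro j
      rw [List.foldl_cons, hget j, hfget j, List.filter_cons, List.append_assoc]
      by_cases hj : j < kc.2.toNat
      · simp [hj]
      · simp [hj]

-- foldr-max is an upper bound, and is attained or zero
lemma pvFoldrMax_ub (ns : List Nat) (x : Nat) (hx : x ∈ ns) : x ≤ ns.foldr max 0 := by
  induction ns with
  | nil => exact absurd hx List.not_mem_nil
  | cons a ns ih =>
    rcases List.mem_cons.mp hx with rfl | hx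
    · exact le_max_left _ _
    · exact le_trans (ih hx) (le_max_right _ _)

lemma pvFoldrMax_attained (ns : List Nat) :
    ns.foldr max 0 = 0 ∨ ∃ x ∈ ns, ns.foldr max 0 = x := by
  induction ns with
  | nil => exact Or.inl rfl
  | cons a ns ih =>
    simp only [List.foldr_cons]
    rcases Nat.le_total a (ns.foldr max 0) with h | h
    · rw [max_eq_right h]
      rcases ih with h0 | ⟨x, hx, he⟩
      · exact Or.inl h0
      · exact Or.inr ⟨x, List.mem_cons_of_mem _ hx, he⟩
    · rw [max_eq_left h]
      exact Or.inr ⟨a, List.mem_cons_self, rfl⟩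

lemma pvMaxInt_toNat (l : List Int) (_h : ∀ x ∈ l, 0 ≤ x) :
    ((PySem.List.max? l (fun v => v)).getD 0).toNat = (l.map Int.toNat).foldr max 0 := by
  cases hm : PySem.List.max? l (fun v => v) with
  | none =>
    rw [(PySem.List.max?_eq_none_iff _ _).mp hm]
    rfl
  | some m =>
    have hmem := PySem.List.max?_mem hm
    have hub := PySem.List.max?_isMax hm
    simp only [Option.getD_some]
    apply le_antisymm
    · exact pvFoldrMax_ub _ _ (List.mem_map.mpr ⟨m, hmem, rfl⟩)
    · rcases pvFoldrMax_attained (l.map Int.toNat) with h0 | ⟨x, hx, he⟩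
      · omega
      · obtain ⟨v, hv, rfl⟩ := List.mem_map.mp hx
        rw [he]
        exact Int.toNat_le_toNat (hub v hv)

lemma pvAlt_eq_rows (nums : List Int) :
    findMatrix_alt nums = pvRows (PySem.Dict.counter nums) := by
  have hnd := PySem.Dict.nodup_keys_counter nums
  set d := PySem.Dict.counter nums with hd
  have hpos : ∀ k, 0 ≤ d.getD k 0 := by
    intro k; rw [hd, PySem.Dict.getD_counter]; exact Int.natCast_nonneg _
  have hitems := PySem.Dict.items_eq_map_keys d hnd 0
  -- the port's inner pyRange fold is pvFillN on each item (counts are nonneg)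
  have hinner : d.items.foldl
      (fun rows kc => (PySem.List.pyRange 0 kc.2 1).foldl (pvFillStep kc.1) rows) []
      = d.items.foldl (fun r kc => pvFillN kc.1 r kc.2.toNat) [] := by
    apply PySem.List.foldl_congr_mem
    intro acc kc hkc
    have hpos' : 0 ≤ kc.2 := by
      rw [hitems] at hkc
      obtain ⟨k, _, rfl⟩ := List.mem_map.mp hkc
      exact hpos k
    rw [PySem.List.pyRange_one]
    rw [List.foldl_map, pvFillN]
    have : (kc.2 - 0).toNat = kc.2.toNat := by omega
    rw [this]
    apply PySem.List.foldl_congr_mem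
    intro acc' i _
    simp
  have halt : findMatrix_alt nums = d.items.foldl (fun r kc => pvFillN kc.1 r kc.2.toNat) [] := by
    unfold findMatrix_alt
    rw [PySem.Dict.foldl_insert_getD_add_one_eq_counter, ← hd, hinner]
  obtain ⟨hlen, hget⟩ := pvFoldItems_spec d.items []
  rw [halt]
  -- lengths agree
  have hvals := PySem.Dict.values_eq_map_keys d hnd 0
  have hmaxc : pvMaxc d.items = (pvMaxd d).toNat := by
    rw [pvMaxc, hitems, List.map_map, pvMaxd]
    rw [pvMaxInt_toNat d.values (by
      intro x hx
      rw [hvals] at hx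
      obtain ⟨k, _, rfl⟩ := List.mem_map.mp hx
      exact hpos k)]
    rw [hvals, List.map_map]
    rfl
  have hlen' : (d.items.foldl (fun r kc => pvFillN kc.1 r kc.2.toNat) []).length
      = (pvMaxd d).toNat := by
    rw [hlen, ← hmaxc]; simp
  apply List.ext_getElem
  · rw [hlen']; unfold pvRows; simp
  · intro j hj1 hj2
    have hjlt : j < (pvMaxd d).toNat := by rwa [hlen'] at hj1
    have hL : (d.items.foldl (fun r kc => pvFillN kc.1 r kc.2.toNat) [])[j]
        = (d.items.filter (fun kc => decide (j < kc.2.toNat))).map Prod.fst := by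
      have := hget j
      rw [List.getD_eq_getElem?_getD, List.getElem?_eq_getElem hj1] at this
      simpa using this
    have hR : (pvRows d)[j] = d.keys.filter (fun k => decide ((j : Int) < d.getD k 0)) := by
      unfold pvRows
      rw [List.getElem_map, List.getElem_range]
    rw [hL, hR, hitems, List.filter_map, List.map_map]
    have hfun : (Prod.fst ∘ fun k => (k, d.getD k 0)) = id := rfl
    rw [hfun, List.map_id]
    apply List.filter_congr
    intro k _
    simp only [Function.comp]
    rw [decide_eq_decide]
    have := hpos k
    omega

-- ===== VERDICT (by name: the statement is the Claim_ definition above) =====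
theorem findMatrix_spec : Claim_equal_findMatrix := by
  intro nums _
  unfold Spec_findMatrix
  rw [pvAlt_eq_rows]
  show pvLoopA _ _ [] = _
  rw [pvCounter_eq]
  have hnd := PySem.Dict.nodup_keys_counter nums
  have hpos : ∀ k, 0 ≤ (PySem.Dict.counter nums).getD k 0 := by
    intro k
    rw [PySem.Dict.getD_counter]
    exact Int.natCast_nonneg _
  have hvk : (PySem.Dict.counter nums).values.map Int.toNat
      = (PySem.Dict.counter nums).keys.map (fun k => ((PySem.Dict.counter nums).getD k 0).toNat) := by
    rw [PySem.Dict.values_eq_map_keys _ hnd 0, List.map_map]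
    rfl
  rw [pvLoop_eq _ _ [] hnd hpos (by rw [← hvk]; exact Nat.lt_succ_self _), List.nil_append]
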